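-- pv_equiv track=rewrite | github.com/Jatinch05/Password-Strength-Checker- | project.py | detect_keyboard_pattern_by_grid
-- ===== SOURCE A (Python) =====
-- keyboard_grid = {
--         'q': (0, 0), 'w': (0, 1), 'e': (0, 2), 'r': (0, 3), 't': (0, 4), 'y': (0, 5), 'u': (0, 6), 'i': (0, 7), 'o': (0, 8), 'p': (0, 9),
--         'a': (1, 0), 's': (1, 1), 'd': (1, 2), 'f': (1, 3), 'g': (1, 4), 'h': (1, 5), 'j': (1, 6), 'k': (1, 7), 'l': (1, 8),
--         'z': (2, 0), 'x': (2, 1), 'c': (2, 2), 'v': (2, 3), 'b': (2, 4), 'n': (2, 5), 'm': (2, 6),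
--     }
--
-- def detect_keyboard_pattern_by_grid(password):
--         password = password.lower()
--         adjacent_count = 0
--
--         for i in range(len(password) - 1):
--             if password[i] not in keyboard_grid or password[i + 1] not in keyboard_grid:
--                 adjacent_count = 0
--                 continue
--
--             pos1 = keyboard_grid[password[i]]
--             pos2 = keyboard_grid[password[i + 1]]
--
--             # Calculate movement on the grid
--             row_move = abs(pos1[0] - pos2[0])
--             col_move = abs(pos1[1] - pos2[1])
--
--             # Check for direct horizontal, vertical, or diagonal adjacency
--             if  (row_move <= 1 and col_move <= 1):
--                 if (password[i].isalpha() == password[i + 1].isalpha()) or (password[i].isdigit() == password[i + 1].isdigit()):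
--                     adjacent_count += 1
--                 if adjacent_count >= 2:  # At least three consecutive adjacent characters
--                     return 1
--             else:
--                 adjacent_count = 0  # Reset if not directly adjacent
--
--         return 0
-- ===== SOURCE B (Python) =====
-- keyboard_grid = {
--         'q': (0, 0), 'w': (0, 1), 'e': (0, 2), 'r': (0, 3), 't': (0, 4), 'y': (0, 5), 'u': (0, 6), 'i': (0, 7), 'o': (0, 8), 'p': (0, 9),
--         'a': (1, 0), 's': (1, 1), 'd': (1, 2), 'f': (1, 3), 'g': (1, 4), 'h': (1, 5), 'j': (1, 6), 'k': (1, 7), 'l': (1, 8),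
--         'z': (2, 0), 'x': (2, 1), 'c': (2, 2), 'v': (2, 3), 'b': (2, 4), 'n': (2, 5), 'm': (2, 6),
--     }
--
-- def detect_keyboard_pattern_by_grid(password):
--     # Stateless: look up every character's grid position once, then test each
--     # 3-character window independently for two adjacent steps.
--     pos = [keyboard_grid.get(ch) for ch in password.lower()]
--
--     def adj(u, v):
--         return u is not None and v is not None and abs(u[0] - v[0]) <= 1 and abs(u[1] - v[1]) <= 1
--
--     return int(any(adj(u, v) and adj(v, w) for u, v, w in zip(pos, pos[1:], pos[2:])))
-- ===== Notes on version B (the rewrite author's own statement) =====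
-- stated objective: simpler
-- what changed: Replaces the stateful streak counter (increment/reset/early-return plus a redundant isalpha/isdigit comparison) with a stateless scan: precompute each character's grid position once, then test every 3-character window independently for two adjacent steps via any() over zipped triples.
import Mathlib
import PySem

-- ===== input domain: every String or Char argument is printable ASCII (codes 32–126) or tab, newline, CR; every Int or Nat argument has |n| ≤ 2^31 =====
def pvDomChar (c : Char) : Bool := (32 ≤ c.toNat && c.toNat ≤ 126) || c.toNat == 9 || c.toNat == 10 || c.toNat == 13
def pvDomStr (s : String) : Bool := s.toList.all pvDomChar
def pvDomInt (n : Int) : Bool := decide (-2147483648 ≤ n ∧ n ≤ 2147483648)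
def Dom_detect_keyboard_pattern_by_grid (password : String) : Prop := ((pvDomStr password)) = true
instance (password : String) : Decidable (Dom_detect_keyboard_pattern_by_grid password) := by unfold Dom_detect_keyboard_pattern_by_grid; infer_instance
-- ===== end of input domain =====

-- B replaces A's stateful adjacency-streak counter with a stateless scan that tests each
-- 3-character window independently (positions looked up once, any() over zipped triples); objective: simpler.


-- module constant keyboard_grid (shared by both Python modules)
def pvGrid : PySem.Dict Char (Int × Int) := PySem.Dict.ofList
  [('q',(0,0)), ('w',(0,1)), ('e',(0,2)), ('r',(0,3)), ('t',(0,4)), ('y',(0,5)), ('u',(0,6)), ('i',(0,7)), ('o',(0,8)), ('p',(0,9)),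
   ('a',(1,0)), ('s',(1,1)), ('d',(1,2)), ('f',(1,3)), ('g',(1,4)), ('h',(1,5)), ('j',(1,6)), ('k',(1,7)), ('l',(1,8)),
   ('z',(2,0)), ('x',(2,1)), ('c',(2,2)), ('v',(2,3)), ('b',(2,4)), ('n',(2,5)), ('m',(2,6))]

-- ===== PORT A =====
-- A's loop 'for i in range(len(password) - 1)' reads password[i], password[i+1]: ported as
-- structural recursion over consecutive pairs of the lowered character list, carrying adjacent_count.
-- password[i].isalpha()/.isdigit() on a one-char string = PySem.Chars.isalpha/isdigit of the char (exact).
def pvLoopA : List Char → Int → Int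
  | c1 :: c2 :: rest, adjacent_count =>
    match pvGrid.get? c1, pvGrid.get? c2 with
    | some pos1, some pos2 =>
      let row_move : Int := |pos1.1 - pos2.1|
      let col_move : Int := |pos1.2 - pos2.2|
      if row_move ≤ 1 ∧ col_move ≤ 1 then
        let cnt' := if (PySem.Chars.isalpha c1 == PySem.Chars.isalpha c2)
                    || (PySem.Chars.isdigit c1 == PySem.Chars.isdigit c2)
                    then adjacent_count + 1 else adjacent_count
        if cnt' ≥ 2 then 1 else pvLoopA (c2 :: rest) cnt'
      else pvLoopA (c2 :: rest) 0
    | _, _ => pvLoopA (c2 :: rest) 0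
  | _, _ => 0

def detect_keyboard_pattern_by_grid (password : String) : Int :=
  pvLoopA (PySem.Str.lower password).toList 0

-- ===== PORT B =====
-- Source B: pos = [keyboard_grid.get(ch) for ch in password.lower()]; adj(u, v); any over zip(pos, pos[1:], pos[2:]).
def pvAdj : Option (Int × Int) → Option (Int × Int) → Bool
  | some u, some v => decide (|u.1 - v.1| ≤ 1) && decide (|u.2 - v.2| ≤ 1)
  | _, _ => false

-- any(adj(u,v) and adj(v,w) for u,v,w in zip(pos, pos[1:], pos[2:]))
def pvAnyWin : List (Option (Int × Int)) → Bool
  | u :: v :: w :: rest => (pvAdj u v && pvAdj v w) || pvAnyWin (v :: w :: rest)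
  | _ => false

def detect_keyboard_pattern_by_grid_alt (password : String) : Int :=
  let pos := (PySem.Str.lower password).toList.map (fun ch => pvGrid.get? ch)
  if pvAnyWin pos then 1 else 0

-- ===== PRECONDITION & SPEC =====
def Spec_detect_keyboard_pattern_by_grid (password : String) (out : Int) : Prop := out = detect_keyboard_pattern_by_grid_alt password
instance (password : String) (out : Int) : Decidable (Spec_detect_keyboard_pattern_by_grid password out) := by unfold Spec_detect_keyboard_pattern_by_grid; infer_instance

-- ===== CLAIM (what is proved, stated in full; the proofs are below) =====
def Claim_equal_detect_keyboard_pattern_by_grid : Prop := ∀ (password : String), Dom_detect_keyboard_pattern_by_grid password → Spec_detect_keyboard_pattern_by_grid password (detect_keyboard_pattern_by_grid password)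

-- ===== LEMMAS AND PROOFS =====

-- every key of the grid is a (lowercase) letter, so A's isalpha==isalpha test is true whenever both lookups succeed
theorem pvGrid_alpha (c : Char) (p : Int × Int) (h : pvGrid.get? c = some p) :
    PySem.Chars.isalpha c = true := by
  have hm := PySem.Dict.mem_items_of_get?_eq_some _ h
  have hit : pvGrid.items = [('q',((0:Int),(0:Int))), ('w',(0,1)), ('e',(0,2)), ('r',(0,3)), ('t',(0,4)), ('y',(0,5)), ('u',(0,6)), ('i',(0,7)), ('o',(0,8)), ('p',(0,9)),
     ('a',(1,0)), ('s',(1,1)), ('d',(1,2)), ('f',(1,3)), ('g',(1,4)), ('h',(1,5)), ('j',(1,6)), ('k',(1,7)), ('l',(1,8)),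
     ('z',(2,0)), ('x',(2,1)), ('c',(2,2)), ('v',(2,3)), ('b',(2,4)), ('n',(2,5)), ('m',(2,6))] := by decide
  rw [hit] at hm
  simp only [List.mem_cons, List.not_mem_nil, or_false, Prod.mk.injEq] at hm
  rcases hm with ⟨rfl,-⟩|⟨rfl,-⟩|⟨rfl,-⟩|⟨rfl,-⟩|⟨rfl,-⟩|⟨rfl,-⟩|⟨rfl,-⟩|⟨rfl,-⟩|⟨rfl,-⟩|⟨rfl,-⟩|⟨rfl,-⟩|⟨rfl,-⟩|⟨rfl,-⟩|⟨rfl,-⟩|⟨rfl,-⟩|⟨rfl,-⟩|⟨rfl,-⟩|⟨rfl,-⟩|⟨rfl,-⟩|⟨rfl,-⟩|⟨rfl,-⟩|⟨rfl,-⟩|⟨rfl,-⟩|⟨rfl,-⟩|⟨rfl,-⟩|⟨rfl,-⟩ <;> rfl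

-- adjacency of the head pair of a character list, as B computes it
def pvHeadAdj : List Char → Bool
  | c1 :: c2 :: _ => pvAdj (pvGrid.get? c1) (pvGrid.get? c2)
  | _ => false

theorem pvAdj_none_left (v : Option (Int × Int)) : pvAdj none v = false := by cases v <;> rfl

theorem pvAdj_none_right (u : Option (Int × Int)) : pvAdj u none = false := by cases u <;> rfl

-- characterisation of A's loop: with a nonnegative counter, it returns 1 exactly when the counter is
-- already ≥ 1 and the head pair is adjacent, or some 3-window has two adjacent steps; else 0
theorem pvLoopA_char : ∀ (l : List Char) (cnt : Int), 0 ≤ cnt →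
    pvLoopA l cnt = if (1 ≤ cnt ∧ pvHeadAdj l = true) ∨ pvAnyWin (l.map (fun ch => pvGrid.get? ch)) = true then 1 else 0 := by
  intro l
  induction l with
  | nil => intro cnt _; simp [pvLoopA, pvHeadAdj, pvAnyWin]
  | cons c1 tl IH =>
    intro cnt hcnt
    cases tl with
    | nil => simp [pvLoopA, pvHeadAdj, pvAnyWin]
    | cons c2 rest =>
      have hH : pvHeadAdj (c1 :: c2 :: rest) = pvAdj (pvGrid.get? c1) (pvGrid.get? c2) := rfl
      rw [pvLoopA]
      cases hg1 : pvGrid.get? c1 with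
      | none =>
        have hA12 : pvAdj (pvGrid.get? c1) (pvGrid.get? c2) = false := by
          rw [hg1]; exact pvAdj_none_left _
        rw [IH 0 le_rfl]
        cases rest with
        | nil => simp [pvHeadAdj, pvAnyWin, hA12]
        | cons c3 r => simp [List.map, pvAnyWin, pvHeadAdj, hA12]
      | some pos1 =>
        cases hg2 : pvGrid.get? c2 with
        | none =>
          have hA12 : pvAdj (pvGrid.get? c1) (pvGrid.get? c2) = false := by
            rw [hg2]; exact pvAdj_none_right _
          rw [IH 0 le_rfl]
          cases rest with
          | nil => simp [pvHeadAdj, pvAnyWin, hA12]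
          | cons c3 r => simp [List.map, pvAnyWin, pvHeadAdj, hA12]
        | some pos2 =>
          have hA12 : pvAdj (pvGrid.get? c1) (pvGrid.get? c2) = pvAdj (some pos1) (some pos2) := by
            rw [hg1, hg2]
          by_cases hadj : |pos1.1 - pos2.1| ≤ 1 ∧ |pos1.2 - pos2.2| ≤ 1
          · -- adjacent pair: the isalpha test is true, so the counter increments
            have ha1 := pvGrid_alpha c1 pos1 hg1
            have ha2 := pvGrid_alpha c2 pos2 hg2
            have hAdjB : pvAdj (pvGrid.get? c1) (pvGrid.get? c2) = true := by
              rw [hA12]; simp [pvAdj]; exact hadj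
            simp only [hadj, ha1, ha2, BEq.rfl, Bool.true_or, if_pos]
            by_cases h1 : 1 ≤ cnt
            · have h2 : cnt + 1 ≥ 2 := by omega
              have hc : (1 ≤ cnt ∧ pvHeadAdj (c1 :: c2 :: rest) = true) ∨
                  pvAnyWin ((c1 :: c2 :: rest).map (fun ch => pvGrid.get? ch)) = true :=
                Or.inl ⟨h1, by rw [hH, hAdjB]⟩
              rw [if_pos hc]
              simp [h2]
            · have hc0 : cnt = 0 := by omega
              subst hc0
              norm_num
              rw [IH 1 (by omega)]
              cases rest with
              | nil => simp [pvHeadAdj, pvAnyWin,]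
              | cons c3 r =>
                by_cases h3 : pvAdj (pvGrid.get? c2) (pvGrid.get? c3) = true
                · simp [List.map, pvAnyWin, pvHeadAdj, hAdjB, h3]
                · simp only [Bool.not_eq_true] at h3
                  simp [List.map, pvAnyWin, pvHeadAdj, hAdjB, h3]
          · -- not adjacent: the counter resets
            have hAdjB : pvAdj (pvGrid.get? c1) (pvGrid.get? c2) = false := by
              rw [hA12]; simp only [pvAdj, Bool.and_eq_false_iff, decide_eq_false_iff_not]; omega
            simp only [hadj, if_false]
            rw [IH 0 le_rfl]
            cases rest with
            | nil => simp [pvHeadAdj, pvAnyWin, hAdjB]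
            | cons c3 r => simp [List.map, pvAnyWin, pvHeadAdj, hAdjB]

-- ===== VERDICT (by name: the statement is the Claim_ definition above) =====
theorem detect_keyboard_pattern_by_grid_spec : Claim_equal_detect_keyboard_pattern_by_grid := by
  intro password _
  unfold Spec_detect_keyboard_pattern_by_grid detect_keyboard_pattern_by_grid detect_keyboard_pattern_by_grid_alt
  rw [pvLoopA_char _ 0 le_rfl]
  simp
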